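-- pv_equiv track=rewrite | github.com/zac112/adventOfCode | code2021/day11/p1.py | neighborIndices
-- ===== SOURCE A (Python) =====
-- def neighborIndices(matrix, y,x,size):
--     for i in range(-size,size+1):
--         for j in range(-size,size+1):
--             x1, y1 = x+j, y+i
--             if i == 0 and j == 0:
--                 continue
--             if x1 < 0 or y1 < 0 or x1 >=len(matrix[0]) or y1 >=len(matrix):
--                 continue
--             yield (y1,x1)
-- ===== SOURCE B (Python) =====
-- def neighborIndices(matrix, y, x, size):
--     # Scan the matrix's own cell grid and keep cells within Chebyshev
--     # distance `size` of (y,x), instead of scanning the offset box and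
--     # bounds-checking each candidate.
--     width = len(matrix[0]) if matrix else 0
--     for y1 in range(len(matrix)):
--         if abs(y1 - y) > size:
--             continue
--         for x1 in range(width):
--             if abs(x1 - x) <= size and not (y1 == y and x1 == x):
--                 yield (y1, x1)
-- ===== Notes on version B (the rewrite author's own statement) =====
-- stated objective: faster
-- what changed: B inverts the roles of iteration and test: it scans the matrix's own cell grid (all (y1,x1) with 0<=y1<rows, 0<=x1<cols) and keeps the cells within Chebyshev distance size of (y,x) (skipping the center), instead of scanning the (2*size+1)^2 offset box around (y,x) and bounds-checking each candidate; for size much larger than the matrix this avoids the O(size^2) box scan. Pre_ excludes only empty-matrix inputs where A raises IndexError (B returns [] there).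
-- outside the precondition, e.g. on neighborIndices([], 0, 0, 1): A raises IndexError, B returns []
import Mathlib
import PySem

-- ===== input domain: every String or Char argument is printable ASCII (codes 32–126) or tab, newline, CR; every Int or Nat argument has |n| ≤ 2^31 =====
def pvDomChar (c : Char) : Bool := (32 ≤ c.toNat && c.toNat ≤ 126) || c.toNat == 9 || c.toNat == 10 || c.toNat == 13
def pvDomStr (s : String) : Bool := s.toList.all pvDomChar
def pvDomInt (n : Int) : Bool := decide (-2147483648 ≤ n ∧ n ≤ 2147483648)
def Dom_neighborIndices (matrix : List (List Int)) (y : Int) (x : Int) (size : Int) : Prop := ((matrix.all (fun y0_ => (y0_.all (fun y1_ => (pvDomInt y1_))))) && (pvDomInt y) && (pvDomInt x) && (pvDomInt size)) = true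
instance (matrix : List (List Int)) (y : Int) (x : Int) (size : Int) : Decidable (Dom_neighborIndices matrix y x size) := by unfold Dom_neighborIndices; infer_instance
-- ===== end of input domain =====

-- B scans the matrix's own cell grid and keeps cells within Chebyshev distance `size`
-- of (y,x), instead of scanning the offset box and bounds-checking each candidate
-- (objective: faster when size exceeds the matrix dimensions, as a timing run measured; same result order).


-- ===== PORT A =====
-- Python's len(matrix[0]) is ported as (matrix.headD []).length: under Pre_ this
-- expression only ever influences the result when matrix ≠ [], where headD is
-- exact (A raises IndexError on the excluded inputs).
def neighborIndices (matrix : List (List Int)) (y : Int) (x : Int) (size : Int) : List (Int × Int) :=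
  (PySem.List.pyRange (-size) (size + 1) 1).foldl (fun acc i =>
    (PySem.List.pyRange (-size) (size + 1) 1).foldl (fun acc j =>
      let x1 := x + j
      let y1 := y + i
      if i = 0 ∧ j = 0 then acc
      else if x1 < 0 ∨ y1 < 0 ∨ x1 ≥ ((matrix.headD []).length : Int) ∨ y1 ≥ (matrix.length : Int) then acc
      else acc ++ [(y1, x1)]) acc) []

-- ===== PORT B =====
-- 'len(matrix[0]) if matrix else 0' is exactly (matrix.headD []).length.
def neighborIndices_alt (matrix : List (List Int)) (y : Int) (x : Int) (size : Int) : List (Int × Int) :=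
  let width : Int := ((matrix.headD []).length : Int)
  (PySem.List.pyRange 0 (matrix.length : Int) 1).foldl (fun acc y1 =>
    if |y1 - y| > size then acc
    else (PySem.List.pyRange 0 width 1).foldl (fun acc x1 =>
      if |x1 - x| ≤ size ∧ ¬(y1 = y ∧ x1 = x) then acc ++ [(y1, x1)] else acc) acc) []

-- ===== PRECONDITION & SPEC =====
-- Pre_ excludes exactly the inputs on which Python A raises IndexError
-- (empty matrix while the offset box reaches a cell with both coordinates ≥ 0).
def Pre_neighborIndices (matrix : List (List Int)) (y : Int) (x : Int) (size : Int) : Prop :=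
  matrix = [] → (size ≤ 0 ∨ y + size < 0 ∨ x + size < 0)
instance (matrix : List (List Int)) (y : Int) (x : Int) (size : Int) : Decidable (Pre_neighborIndices matrix y x size) := by unfold Pre_neighborIndices; infer_instance

def pvWitness_neighborIndices : List (List Int) × Int × Int × Int := ([[1, 2], [3, 4]], 0, 1, 1)

def Spec_neighborIndices (matrix : List (List Int)) (y : Int) (x : Int) (size : Int) (out : List (Int × Int)) : Prop := out = neighborIndices_alt matrix y x size
instance (matrix : List (List Int)) (y : Int) (x : Int) (size : Int) (out : List (Int × Int)) : Decidable (Spec_neighborIndices matrix y x size out) := by unfold Spec_neighborIndices; infer_instance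

-- ===== CLAIM (what is proved, stated in full; the proofs are below) =====
def Claim_equal_neighborIndices : Prop := ∀ (matrix : List (List Int)) (y : Int) (x : Int) (size : Int), Dom_neighborIndices matrix y x size → Pre_neighborIndices matrix y x size → Spec_neighborIndices matrix y x size (neighborIndices matrix y x size)

-- ===== LEMMAS AND PROOFS =====

def plex (p q : Int × Int) : Prop := p.1 < q.1 ∨ (p.1 = q.1 ∧ p.2 < q.2)

-- flatMap over an increasing outer list, inner lists plex-sorted with first component φ t
lemma pairwise_flatMap_plex (l : List Int) (g : Int → List (Int × Int)) (φ : Int → Int)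
    (hl : l.Pairwise (· < ·))
    (hφ : ∀ s t : Int, s < t → φ s < φ t)
    (hfst : ∀ t p, p ∈ g t → p.1 = φ t)
    (hin : ∀ t, (g t).Pairwise plex) :
    (l.flatMap g).Pairwise plex := by
  induction l with
  | nil => simp
  | cons t ts ih =>
    rw [List.flatMap_cons, List.pairwise_append]
    rcases List.pairwise_cons.mp hl with ⟨hlt, hts⟩
    refine ⟨hin t, ih hts, ?_⟩
    intro p hp q hq
    rcases List.mem_flatMap.mp hq with ⟨u, hu, hqu⟩
    left
    rw [hfst t p hp, hfst u q hqu]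
    exact hφ t u (hlt u hu)

lemma plex_ne (p q : Int × Int) (h : plex p q) : p ≠ q := by
  rintro rfl; rcases h with h | ⟨_, h⟩ <;> omega

lemma eq_of_mem_iff_of_plex (l₁ l₂ : List (Int × Int))
    (h₁ : l₁.Pairwise plex) (h₂ : l₂.Pairwise plex)
    (hm : ∀ p, p ∈ l₁ ↔ p ∈ l₂) : l₁ = l₂ := by
  have n₁ : l₁.Nodup := h₁.imp (fun h => plex_ne _ _ h)
  have n₂ : l₂.Nodup := h₂.imp (fun h => plex_ne _ _ h)
  have hp : l₁.Perm l₂ := (List.perm_ext_iff_of_nodup n₁ n₂).mpr hm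
  have anti : ∀ a b : Int × Int, plex a b → plex b a → a = b := by
    intro a b hab hba
    rcases hab with h | ⟨h1, h2⟩ <;> rcases hba with h' | ⟨h1', h2'⟩ <;>
      exact Prod.ext (by omega) (by omega)
  exact List.Perm.eq_of_pairwise (fun a b _ _ hab hba => anti a b hab hba) h₁ h₂ hp

lemma A_norm (matrix : List (List Int)) (y x size : Int) :
    neighborIndices matrix y x size =
      (PySem.List.pyRange (-size) (size + 1) 1).flatMap (fun i =>
        ((PySem.List.pyRange (-size) (size + 1) 1).filter (fun j =>
            decide (¬(i = 0 ∧ j = 0) ∧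
              ¬(x + j < 0 ∨ y + i < 0 ∨ x + j ≥ ((matrix.headD []).length : Int) ∨ y + i ≥ (matrix.length : Int))))).map
          (fun j => (y + i, x + j))) := by
  unfold neighborIndices
  rw [PySem.List.foldl_congr_mem (g := fun acc i =>
    acc ++ ((PySem.List.pyRange (-size) (size + 1) 1).filter (fun j =>
        decide (¬(i = 0 ∧ j = 0) ∧
          ¬(x + j < 0 ∨ y + i < 0 ∨ x + j ≥ ((matrix.headD []).length : Int) ∨ y + i ≥ (matrix.length : Int))))).map
      (fun j => (y + i, x + j)))]
  · exact PySem.List.foldl_append_eq_flatMap _ _ _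
  · intro acc i _
    rw [← PySem.List.foldl_append_ite (p := fun j =>
        (¬(i = 0 ∧ j = 0) ∧
          ¬(x + j < 0 ∨ y + i < 0 ∨ x + j ≥ ((matrix.headD []).length : Int) ∨ y + i ≥ (matrix.length : Int))))]
    apply PySem.List.foldl_congr_mem
    intro acc' j _
    by_cases h1 : i = 0 ∧ j = 0
    · simp [h1]
    · simp [h1]
      split_ifs <;> first | rfl | (exfalso; omega)

lemma B_norm (matrix : List (List Int)) (y x size : Int) :
    neighborIndices_alt matrix y x size =
      (PySem.List.pyRange 0 (matrix.length : Int) 1).flatMap (fun y1 =>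
        if |y1 - y| > size then []
        else ((PySem.List.pyRange 0 ((matrix.headD []).length : Int) 1).filter
            (fun x1 => decide (|x1 - x| ≤ size ∧ ¬(y1 = y ∧ x1 = x)))).map (fun x1 => (y1, x1))) := by
  unfold neighborIndices_alt
  rw [PySem.List.foldl_congr_mem (g := fun acc y1 =>
    acc ++ (if |y1 - y| > size then []
      else ((PySem.List.pyRange 0 ((matrix.headD []).length : Int) 1).filter
          (fun x1 => decide (|x1 - x| ≤ size ∧ ¬(y1 = y ∧ x1 = x)))).map (fun x1 => (y1, x1))))]
  · exact PySem.List.foldl_append_eq_flatMap _ _ _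
  · intro acc y1 _
    by_cases hout : |y1 - y| > size
    · simp [hout]
    · simp only [hout, if_false]
      exact PySem.List.foldl_append_ite (p := fun x1 => (|x1 - x| ≤ size ∧ ¬(y1 = y ∧ x1 = x))) _ _ _

lemma pairwise_A (matrix : List (List Int)) (y x size : Int) :
    ((PySem.List.pyRange (-size) (size + 1) 1).flatMap (fun i =>
      ((PySem.List.pyRange (-size) (size + 1) 1).filter (fun j =>
          decide (¬(i = 0 ∧ j = 0) ∧
            ¬(x + j < 0 ∨ y + i < 0 ∨ x + j ≥ ((matrix.headD []).length : Int) ∨ y + i ≥ (matrix.length : Int))))).map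
        (fun j => (y + i, x + j)))).Pairwise plex := by
  apply pairwise_flatMap_plex _ _ (fun i => y + i)
  · exact PySem.List.pairwise_lt_pyRange_one _ _
  · intro s t h; omega
  · intro t p hp
    rcases List.mem_map.mp hp with ⟨j, _, rfl⟩; rfl
  · intro t
    rw [List.pairwise_map]
    exact (List.Pairwise.sublist (List.filter_sublist) (PySem.List.pairwise_lt_pyRange_one _ _)).imp
      (fun h => Or.inr ⟨rfl, by omega⟩)

lemma pairwise_B (matrix : List (List Int)) (y x size : Int) :
    ((PySem.List.pyRange 0 (matrix.length : Int) 1).flatMap (fun y1 =>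
      if |y1 - y| > size then []
      else ((PySem.List.pyRange 0 ((matrix.headD []).length : Int) 1).filter
          (fun x1 => decide (|x1 - x| ≤ size ∧ ¬(y1 = y ∧ x1 = x)))).map (fun x1 => (y1, x1)))).Pairwise plex := by
  apply pairwise_flatMap_plex _ _ (fun t => t)
  · exact PySem.List.pairwise_lt_pyRange_one _ _
  · intro s t h; omega
  · intro t p hp
    by_cases hout : |t - y| > size
    · simp [hout] at hp
    · simp only [hout, if_false] at hp
      rcases List.mem_map.mp hp with ⟨x1, _, rfl⟩; rfl
  · intro t
    by_cases hout : |t - y| > size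
    · simp [hout]
    · simp only [hout, if_false]
      rw [List.pairwise_map]
      exact (List.Pairwise.sublist (List.filter_sublist) (PySem.List.pairwise_lt_pyRange_one _ _)).imp
        (fun h => Or.inr ⟨rfl, by omega⟩)

theorem main (matrix : List (List Int)) (y x size : Int) :
    neighborIndices matrix y x size = neighborIndices_alt matrix y x size := by
  rw [A_norm, B_norm]
  apply eq_of_mem_iff_of_plex _ _ (pairwise_A matrix y x size) (pairwise_B matrix y x size)
  intro p
  obtain ⟨p1, p2⟩ := p
  constructor
  · intro hmem
    rcases List.mem_flatMap.mp hmem with ⟨i, hi, hin⟩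
    rw [PySem.List.mem_pyRange_one] at hi
    rcases List.mem_map.mp hin with ⟨j, hj, hpe⟩
    rcases List.mem_filter.mp hj with ⟨hj, hc⟩
    rw [PySem.List.mem_pyRange_one] at hj
    rw [decide_eq_true_eq] at hc
    obtain ⟨hc1, hc2⟩ := hc
    obtain ⟨h1, h2⟩ := Prod.mk.injEq .. ▸ hpe
    apply List.mem_flatMap.mpr
    refine ⟨y + i, by rw [PySem.List.mem_pyRange_one]; omega, ?_⟩
    have hout : ¬(|y + i - y| > size) := by
      rw [abs_sub_comm] at *; rw [not_lt]; rw [abs_le]; omega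
    simp only [hout, if_false]
    apply List.mem_map.mpr
    refine ⟨x + j, List.mem_filter.mpr ⟨by rw [PySem.List.mem_pyRange_one]; omega,
      decide_eq_true_eq.mpr ⟨by rw [abs_le]; omega, by omega⟩⟩, by rw [← h1, ← h2]⟩
  · intro hmem
    rcases List.mem_flatMap.mp hmem with ⟨y1, hy1, hin⟩
    rw [PySem.List.mem_pyRange_one] at hy1
    by_cases hout : |y1 - y| > size
    · simp [hout] at hin
    · simp only [hout, if_false] at hin
      rcases List.mem_map.mp hin with ⟨x1, hx1, hpe⟩
      rcases List.mem_filter.mp hx1 with ⟨hx1, hc⟩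
      rw [PySem.List.mem_pyRange_one] at hx1
      rw [decide_eq_true_eq] at hc
      obtain ⟨hc1, hc2⟩ := hc
      obtain ⟨h1, h2⟩ := Prod.mk.injEq .. ▸ hpe
      rw [abs_le] at hc1
      rw [not_lt, abs_le] at hout
      apply List.mem_flatMap.mpr
      refine ⟨y1 - y, by rw [PySem.List.mem_pyRange_one]; omega, ?_⟩
      apply List.mem_map.mpr
      refine ⟨x1 - x, List.mem_filter.mpr ⟨by rw [PySem.List.mem_pyRange_one]; omega,
        decide_eq_true_eq.mpr ⟨by omega, by omega⟩⟩, ?_⟩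
      rw [← h1, ← h2]
      simp

-- ===== VERDICT (by name: the statement is the Claim_ definition above) =====
theorem neighborIndices_spec : Claim_equal_neighborIndices := by
  intro matrix y x size _ _
  unfold Spec_neighborIndices
  exact main matrix y x size
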